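-- pv_equiv track=rewrite | github.com/oernster/trainer | src/ui/train_widgets.py | _classify_station_type
-- ===== SOURCE A (Python) =====
-- def _classify_station_type(station_name: str) -> str:
--     """Classify station type based on naming patterns to help detect interchanges."""
--     name_lower = station_name.lower()
--
--     if 'london' in name_lower:
--         return 'london_terminal'
--     elif any(suburb in name_lower for suburb in ['north', 'south', 'east', 'west', 'central']):
--         return 'regional_hub'
--     elif any(indicator in name_lower for indicator in ['junction', 'parkway', 'interchange']):
--         return 'interchange_hub'
--     else:
--         return 'local_station'
-- ===== SOURCE B (Python) =====
-- _KEYWORD_RANK = [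
--     ("london", 0),
--     ("north", 1), ("south", 1), ("east", 1), ("west", 1), ("central", 1),
--     ("junction", 2), ("parkway", 2), ("interchange", 2),
-- ]
-- _LABELS = ("london_terminal", "regional_hub", "interchange_hub", "local_station")
--
--
-- def _classify_station_type(station_name: str) -> str:
--     """Classify by a single left-to-right scan of the name: at each position,
--     check which keywords start there and keep the best (lowest) priority seen."""
--     name = station_name.lower()
--     best = 3
--     for i in range(len(name)):
--         for kw, rank in _KEYWORD_RANK:
--             if rank < best and name.startswith(kw, i):
--                 best = rank
--     return _LABELS[best]
-- ===== Notes on version B (the rewrite author's own statement) =====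
-- stated objective: alternative
-- what changed: Instead of A's if/elif ladder of per-keyword substring searches, B makes a single left-to-right scan over the positions of the lowercased name, keeping the minimum priority rank of any keyword that starts at each position, and maps the final rank to its label; it trades A's built-in substring search for one explicit text scan.
import Mathlib
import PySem

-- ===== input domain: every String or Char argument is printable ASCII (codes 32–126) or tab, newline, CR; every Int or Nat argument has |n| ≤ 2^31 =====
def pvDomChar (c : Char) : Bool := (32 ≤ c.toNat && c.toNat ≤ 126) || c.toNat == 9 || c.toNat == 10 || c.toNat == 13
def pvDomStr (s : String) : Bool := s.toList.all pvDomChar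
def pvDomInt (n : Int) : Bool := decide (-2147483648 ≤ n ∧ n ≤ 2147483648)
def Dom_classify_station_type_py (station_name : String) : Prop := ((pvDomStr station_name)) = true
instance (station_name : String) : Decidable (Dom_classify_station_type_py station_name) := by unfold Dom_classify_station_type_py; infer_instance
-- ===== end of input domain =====

-- B replaces A's if/elif ladder of substring searches by one left-to-right scan of the
-- lowercased name keeping the minimum priority rank of any keyword starting at each position
-- (alternative algorithm; not claimed faster).

-- ===== PORT A =====
def classify_station_type_py (station_name : String) : String :=
  let name_lower := PySem.Str.lower station_name
  if PySem.Str.isIn "london" name_lower then "london_terminal"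
  else if ["north", "south", "east", "west", "central"].any
      (fun suburb => PySem.Str.isIn suburb name_lower) then "regional_hub"
  else if ["junction", "parkway", "interchange"].any
      (fun indicator => PySem.Str.isIn indicator name_lower) then "interchange_hub"
  else "local_station"

-- ===== PORT B =====
def pvKwRank : List (String × Nat) :=
  [("london", 0),
   ("north", 1), ("south", 1), ("east", 1), ("west", 1), ("central", 1),
   ("junction", 2), ("parkway", 2), ("interchange", 2)]

def pvLabels : List String :=
  ["london_terminal", "regional_hub", "interchange_hub", "local_station"]

def classify_station_type_py_alt (station_name : String) : String :=
  let name := (PySem.Str.lower station_name).toList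
  -- for i in range(len(name)): for kw, rank in _KEYWORD_RANK: if rank < best and name.startswith(kw, i): best = rank
  let best := (List.range name.length).foldl
    (fun b i => pvKwRank.foldl
      (fun b p => if p.2 < b && PySem.Chars.startswith (name.drop i) p.1.toList then p.2 else b) b) 3
  pvLabels.getD best "local_station"

-- ===== PRECONDITION & SPEC =====
def Spec_classify_station_type_py (station_name : String) (out : String) : Prop := out = classify_station_type_py_alt station_name
instance (station_name : String) (out : String) : Decidable (Spec_classify_station_type_py station_name out) := by unfold Spec_classify_station_type_py; infer_instance

-- ===== CLAIM (what is proved, stated in full; the proofs are below) =====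
def Claim_equal_classify_station_type_py : Prop := ∀ (station_name : String), Dom_classify_station_type_py station_name → Spec_classify_station_type_py station_name (classify_station_type_py station_name)

-- ===== LEMMAS AND PROOFS =====

-- the matching condition of B's scan, with the name fixed
def pvCond (s : List Char) (x : Nat × (String × Nat)) : Bool :=
  PySem.Chars.startswith (s.drop x.1) x.2.1.toList

-- B's nested loops flattened to one fold over (position, table-entry) pairs
def pvPairs (s : List Char) : List (Nat × (String × Nat)) :=
  (List.range s.length).flatMap (fun i => pvKwRank.map (fun p => (i, p)))

def pvMinFold (s : List Char) (L : List (Nat × (String × Nat))) (b : Nat) : Nat :=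
  L.foldl (fun b x => if pvCond s x then min b x.2.2 else b) b

lemma pv_foldl_flatMap {α β γ : Type} (f : β → α → β) (g : γ → List α) (l : List γ) (b : β) :
    (l.flatMap g).foldl f b = l.foldl (fun b x => (g x).foldl f b) b := by
  induction l generalizing b with
  | nil => rfl
  | cons y ys ih => simp [List.flatMap_cons, List.foldl_append, ih]

lemma pvMinFold_eq_nested (s : List Char) :
    (List.range s.length).foldl
      (fun b i => pvKwRank.foldl
        (fun b p => if p.2 < b && PySem.Chars.startswith (s.drop i) p.1.toList then p.2 else b) b) 3
    = pvMinFold s (pvPairs s) 3 := by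
  unfold pvMinFold pvPairs
  rw [pv_foldl_flatMap]
  apply List.foldl_ext
  intro b i _
  rw [List.foldl_map]
  apply List.foldl_ext
  intro b p _
  simp only [pvCond]
  cases hc : PySem.Chars.startswith (s.drop i) p.1.toList
  · simp
  · simp only [Bool.and_true, decide_eq_true_eq]
    rw [Nat.min_def]
    split_ifs <;> omega

lemma pvMinFold_cons (s : List Char) (y : Nat × (String × Nat))
    (ys : List (Nat × (String × Nat))) (b : Nat) :
    pvMinFold s (y :: ys) b = pvMinFold s ys (if pvCond s y then min b y.2.2 else b) := rfl

lemma pvMinFold_le (s : List Char) (L : List (Nat × (String × Nat))) (b : Nat) :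
    pvMinFold s L b ≤ b := by
  induction L generalizing b with
  | nil => exact Nat.le_refl b
  | cons y ys ih =>
      rw [pvMinFold_cons]
      refine Nat.le_trans (ih _) ?_
      split_ifs
      · exact Nat.min_le_left _ _
      · exact Nat.le_refl b

lemma pvMinFold_le_matched (s : List Char) (L : List (Nat × (String × Nat))) (b : Nat)
    (x : Nat × (String × Nat)) (hx : x ∈ L) (hc : pvCond s x = true) :
    pvMinFold s L b ≤ x.2.2 := by
  induction L generalizing b with
  | nil => cases hx
  | cons y ys ih =>
      rw [pvMinFold_cons]
      rcases List.mem_cons.mp hx with rfl | hx'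
      · rw [if_pos hc]
        exact Nat.le_trans (pvMinFold_le s ys _) (Nat.min_le_right _ _)
      · exact ih _ hx'

lemma pvMinFold_mem (s : List Char) (L : List (Nat × (String × Nat))) (b : Nat) :
    pvMinFold s L b = b ∨ ∃ x ∈ L, pvCond s x = true ∧ pvMinFold s L b = x.2.2 := by
  induction L generalizing b with
  | nil => exact Or.inl rfl
  | cons y ys ih =>
      rw [pvMinFold_cons]
      cases hc : pvCond s y
      · simp only [Bool.false_eq_true, if_false]
        rcases ih b with h | ⟨x, hx, hcx, hv⟩
        · exact Or.inl h
        · exact Or.inr ⟨x, List.mem_cons_of_mem _ hx, hcx, hv⟩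
      · simp only [if_pos trivial]
        rcases ih (min b y.2.2) with h | ⟨x, hx, hcx, hv⟩
        · rcases Nat.le_total b y.2.2 with hle | hle
          · exact Or.inl (h.trans (Nat.min_eq_left hle))
          · exact Or.inr ⟨y, List.mem_cons_self, hc, h.trans (Nat.min_eq_right hle)⟩
        · exact Or.inr ⟨x, List.mem_cons_of_mem _ hx, hcx, hv⟩

lemma pvCond_isIn {s : List Char} {x : Nat × (String × Nat)} (h : pvCond s x = true) :
    PySem.Chars.isIn x.2.1.toList s = true :=
  (PySem.Chars.exists_prefix_drop_iff_isIn _ _).mp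
    ⟨x.1, (PySem.Chars.startswith_iff _ _).mp h⟩

lemma pv_mem_pvPairs {s : List Char} {x : Nat × (String × Nat)} (hx : x ∈ pvPairs s) :
    x.2 ∈ pvKwRank := by
  rcases List.mem_flatMap.mp hx with ⟨i, _, hm⟩
  rcases List.mem_map.mp hm with ⟨p, hp, rfl⟩
  exact hp

lemma pv_matched (s : List Char) (p : String × Nat) (hp : p ∈ pvKwRank) (hne : p.1.toList ≠ [])
    (h : PySem.Chars.isIn p.1.toList s = true) :
    ∃ i, (i, p) ∈ pvPairs s ∧ pvCond s (i, p) = true := by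
  rcases (PySem.Chars.exists_prefix_drop_iff_isIn _ _).mpr h with ⟨j, hj⟩
  have hjlt : j < s.length := by
    by_contra hge
    have hnil : s.drop j = [] := List.drop_eq_nil_of_le (Nat.le_of_not_lt hge)
    rw [hnil] at hj
    exact hne (List.prefix_nil.mp hj)
  refine ⟨j, ?_, (PySem.Chars.startswith_iff _ _).mpr hj⟩
  exact List.mem_flatMap.mpr ⟨j, List.mem_range.mpr hjlt, List.mem_map.mpr ⟨p, hp, rfl⟩⟩

-- the final value of B's scan, as a function of the lowered character list
def pvBest (s : List Char) : Nat := pvMinFold s (pvPairs s) 3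

lemma pvBest_zero (s : List Char) (hl : PySem.Chars.isIn "london".toList s = true) :
    pvBest s = 0 := by
  rcases pv_matched s ("london", 0) (by decide) (by decide) hl with ⟨i, hmem, hc⟩
  exact Nat.le_zero.mp (pvMinFold_le_matched s (pvPairs s) 3 (i, ("london", 0)) hmem hc)

lemma pvBest_one (s : List Char)
    (hl : PySem.Chars.isIn "london".toList s = false)
    (a : String) (ha : a ∈ ["north", "south", "east", "west", "central"])
    (hd : PySem.Chars.isIn a.toList s = true) :
    pvBest s = 1 := by
  have hmem1 : (a, 1) ∈ pvKwRank ∧ a.toList ≠ [] := by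
    fin_cases ha <;> exact ⟨by decide, by decide⟩
  rcases pv_matched s (a, 1) hmem1.1 hmem1.2 hd with ⟨i, hmem, hc⟩
  have hle : pvBest s ≤ 1 := pvMinFold_le_matched s (pvPairs s) 3 (i, (a, 1)) hmem hc
  have hne0 : pvBest s ≠ 0 := by
    intro h0
    rcases pvMinFold_mem s (pvPairs s) 3 with h3 | ⟨x, hx, hcx, hv⟩
    · rw [pvBest] at h0; omega
    · have hx2 := pv_mem_pvPairs hx
      have hv0 : x.2.2 = 0 := by rw [pvBest] at h0; omega
      have hlon : x.2.1 = "london" :=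
        (by decide : ∀ p ∈ pvKwRank, p.2 = 0 → p.1 = "london") x.2 hx2 hv0
      have hisin := pvCond_isIn hcx
      rw [hlon, hl] at hisin
      cases hisin
  omega

lemma pvBest_two (s : List Char)
    (hl : PySem.Chars.isIn "london".toList s = false)
    (hd : ∀ a ∈ ["north", "south", "east", "west", "central"],
        PySem.Chars.isIn a.toList s = false)
    (a : String) (ha : a ∈ ["junction", "parkway", "interchange"])
    (hi : PySem.Chars.isIn a.toList s = true) :
    pvBest s = 2 := by
  have hmem2 : (a, 2) ∈ pvKwRank ∧ a.toList ≠ [] := by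
    fin_cases ha <;> exact ⟨by decide, by decide⟩
  rcases pv_matched s (a, 2) hmem2.1 hmem2.2 hi with ⟨i, hmem, hc⟩
  have hle : pvBest s ≤ 2 := pvMinFold_le_matched s (pvPairs s) 3 (i, (a, 2)) hmem hc
  have hne : pvBest s ≠ 0 ∧ pvBest s ≠ 1 := by
    constructor <;> intro h0 <;>
    · rcases pvMinFold_mem s (pvPairs s) 3 with h3 | ⟨x, hx, hcx, hv⟩
      · rw [pvBest] at h0; omega
      · have hx2 := pv_mem_pvPairs hx
        have hisin := pvCond_isIn hcx
        have hv2 : x.2.2 ≤ 1 := by rw [pvBest] at h0; omega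
        have hmem6 : x.2.1 ∈ ["london", "north", "south", "east", "west", "central"] :=
          (by decide : ∀ p ∈ pvKwRank,
              p.2 ≤ 1 → p.1 ∈ ["london", "north", "south", "east", "west", "central"])
            x.2 hx2 hv2
        simp only [List.mem_cons, List.not_mem_nil, or_false] at hmem6
        rcases hmem6 with h6 | h6 | h6 | h6 | h6 | h6
        · rw [h6, hl] at hisin; cases hisin
        · rw [h6, hd "north" (by decide)] at hisin; cases hisin
        · rw [h6, hd "south" (by decide)] at hisin; cases hisin
        · rw [h6, hd "east" (by decide)] at hisin; cases hisin
        · rw [h6, hd "west" (by decide)] at hisin; cases hisin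
        · rw [h6, hd "central" (by decide)] at hisin; cases hisin
  omega

lemma pvBest_three (s : List Char)
    (hall : ∀ p ∈ pvKwRank, PySem.Chars.isIn p.1.toList s = false) :
    pvBest s = 3 := by
  rcases pvMinFold_mem s (pvPairs s) 3 with h3 | ⟨x, hx, hcx, _⟩
  · exact h3
  · have hisin := pvCond_isIn hcx
    rw [hall _ (pv_mem_pvPairs hx)] at hisin
    cases hisin

-- ===== VERDICT (by name: the statement is the Claim_ definition above) =====
theorem classify_station_type_py_spec : Claim_equal_classify_station_type_py := by
  intro station_name _
  unfold Spec_classify_station_type_py classify_station_type_py classify_station_type_py_alt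
  dsimp only
  rw [pvMinFold_eq_nested]
  set s := (PySem.Str.lower station_name).toList with hs
  simp only [PySem.Str.isIn_eq, List.any_eq_true, ← hs]
  by_cases hl : PySem.Chars.isIn "london".toList s = true
  · rw [if_pos hl, ← pvBest, pvBest_zero s hl]
    rfl
  · rw [if_neg hl]
    replace hl : PySem.Chars.isIn "london".toList s = false := by
      cases h : PySem.Chars.isIn "london".toList s
      · rfl
      · exact absurd h hl
    by_cases hd : ∃ a ∈ ["north", "south", "east", "west", "central"],
        PySem.Chars.isIn a.toList s = true
    · rcases hd with ⟨a, ha, hda⟩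
      rw [if_pos ⟨a, ha, hda⟩, ← pvBest, pvBest_one s hl a ha hda]
      rfl
    · rw [if_neg hd]
      have hd' : ∀ a ∈ ["north", "south", "east", "west", "central"],
          PySem.Chars.isIn a.toList s = false := by
        intro a ha
        cases h : PySem.Chars.isIn a.toList s
        · rfl
        · exact absurd ⟨a, ha, h⟩ hd
      by_cases hi : ∃ a ∈ ["junction", "parkway", "interchange"],
          PySem.Chars.isIn a.toList s = true
      · rcases hi with ⟨a, ha, hia⟩
        rw [if_pos ⟨a, ha, hia⟩, ← pvBest, pvBest_two s hl hd' a ha hia]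
        rfl
      · rw [if_neg hi]
        have hall : ∀ p ∈ pvKwRank, PySem.Chars.isIn p.1.toList s = false := by
          intro p hp
          cases h : PySem.Chars.isIn p.1.toList s
          · rfl
          · exfalso
            fin_cases hp
            · rw [hl] at h; cases h
            · exact Bool.noConfusion (h.symm.trans (hd' "north" (by decide)))
            · exact Bool.noConfusion (h.symm.trans (hd' "south" (by decide)))
            · exact Bool.noConfusion (h.symm.trans (hd' "east" (by decide)))
            · exact Bool.noConfusion (h.symm.trans (hd' "west" (by decide)))
            · exact Bool.noConfusion (h.symm.trans (hd' "central" (by decide)))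
            · exact hi ⟨"junction", by decide, h⟩
            · exact hi ⟨"parkway", by decide, h⟩
            · exact hi ⟨"interchange", by decide, h⟩
        rw [← pvBest, pvBest_three s hall]
        rfl
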